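-- pv_equiv track=rewrite | github.com/Graver75/python_study | pack_3/problem3_1.py | check
-- ===== SOURCE A (Python) =====
-- def check(string):
--     curly_counter = 0
--     round_counter = 0
--     square_counter = 0
--     for sym in string:
--         if any(x < 0 for x in [curly_counter, round_counter, square_counter]):
--             return False
--         if sym == '{':
--             curly_counter += 1
--         elif sym == '}':
--             curly_counter -= 1
--         elif sym == '(':
--             round_counter += 1
--         elif sym == ')':
--             round_counter -= 1
--         elif sym == '[':
--             square_counter += 1
--         elif sym == ']':
--             square_counter -= 1
--     return all(x == 0 for x in [curly_counter, round_counter, square_counter])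
-- ===== SOURCE B (Python) =====
-- def balanced(string, open_ch, close_ch):
--     count = 0
--     for ch in string:
--         if ch == open_ch:
--             count += 1
--         elif ch == close_ch:
--             count -= 1
--             if count < 0:
--                 return False
--     return count == 0
--
--
-- def check(string):
--     return (balanced(string, '{', '}')
--             and balanced(string, '(', ')')
--             and balanced(string, '[', ']'))
-- ===== Notes on version B (the rewrite author's own statement) =====
-- stated objective: simpler
-- what changed: Replaced A's single pass with three parallel counters and a delayed any-negative check (rebuilding a list for any()/all() each iteration) by a reusable helper balanced(open,close) that scans the string once per bracket type with one counter and an immediate negative check, combined with short-circuit and.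
import Mathlib
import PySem

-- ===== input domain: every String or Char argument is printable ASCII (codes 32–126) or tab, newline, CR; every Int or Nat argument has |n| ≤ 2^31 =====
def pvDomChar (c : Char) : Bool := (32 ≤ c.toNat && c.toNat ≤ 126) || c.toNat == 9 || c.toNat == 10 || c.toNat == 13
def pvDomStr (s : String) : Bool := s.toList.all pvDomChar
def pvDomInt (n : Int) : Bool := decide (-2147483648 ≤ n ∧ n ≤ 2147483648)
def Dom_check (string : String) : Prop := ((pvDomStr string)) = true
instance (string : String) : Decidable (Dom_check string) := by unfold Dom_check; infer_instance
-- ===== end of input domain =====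

-- B replaces A's single three-counter pass (delayed any-negative check) by three independent
-- one-counter scans with an immediate negative check, combined by short-circuit and; objective: simpler.

-- ===== PORT A =====
-- loop of A: state = the three counters; early return on the top-of-loop negativity check
def checkLoop : List Char → Int → Int → Int → Bool
  | [], c, r, s => decide (c = 0) && decide (r = 0) && decide (s = 0)
  | sym :: rest, c, r, s =>
    if c < 0 ∨ r < 0 ∨ s < 0 then false
    else if sym = '{' then checkLoop rest (c + 1) r s
    else if sym = '}' then checkLoop rest (c - 1) r s
    else if sym = '(' then checkLoop rest c (r + 1) s
    else if sym = ')' then checkLoop rest c (r - 1) s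
    else if sym = '[' then checkLoop rest c r (s + 1)
    else if sym = ']' then checkLoop rest c r (s - 1)
    else checkLoop rest c r s

def check (string : String) : Bool := checkLoop string.toList 0 0 0

-- ===== PORT B =====
-- loop of balanced: one counter, immediate negative check after a decrement (early return False)
def balLoop (openc closec : Char) : List Char → Int → Bool
  | [], n => decide (n = 0)
  | ch :: rest, n =>
    if ch = openc then balLoop openc closec rest (n + 1)
    else if ch = closec then
      if n - 1 < 0 then false else balLoop openc closec rest (n - 1)
    else balLoop openc closec rest n

def balanced (string : String) (openc closec : Char) : Bool :=
  balLoop openc closec string.toList 0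

def check_alt (string : String) : Bool :=
  balanced string '{' '}' && balanced string '(' ')' && balanced string '[' ']'

-- ===== PRECONDITION & SPEC =====
def Spec_check (string : String) (out : Bool) : Prop := out = check_alt string
instance (string : String) (out : Bool) : Decidable (Spec_check string out) := by unfold Spec_check; infer_instance

-- ===== CLAIM (what is proved, stated in full; the proofs are below) =====
def Claim_equal_check : Prop := ∀ (string : String), Dom_check string → Spec_check string (check string)

-- ===== LEMMAS AND PROOFS =====
theorem checkLoop_neg (l : List Char) (c r s : Int) (h : c < 0 ∨ r < 0 ∨ s < 0) :
    checkLoop l c r s = false := by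
  cases l with
  | nil => simp [checkLoop]; omega
  | cons x xs => simp [checkLoop, h]

theorem checkLoop_eq (l : List Char) (c r s : Int) (hc : 0 ≤ c) (hr : 0 ≤ r) (hs : 0 ≤ s) :
    checkLoop l c r s =
      (balLoop '{' '}' l c && balLoop '(' ')' l r && balLoop '[' ']' l s) := by
  induction l generalizing c r s with
  | nil => simp [checkLoop, balLoop]
  | cons x xs ih =>
    have hneg : ¬ (c < 0 ∨ r < 0 ∨ s < 0) := by omega
    by_cases h1 : x = '{'
    · subst h1
      simp [checkLoop, balLoop, hneg, ih (c + 1) r s (by omega) hr hs]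
    · by_cases h2 : x = '}'
      · subst h2
        by_cases hc0 : c - 1 < 0
        · simp [checkLoop, balLoop, hneg, hc0, checkLoop_neg xs (c - 1) r s (Or.inl hc0)]
        · simp [checkLoop, balLoop, hneg, hc0, ih (c - 1) r s (by omega) hr hs]
      · by_cases h3 : x = '('
        · subst h3
          simp [checkLoop, balLoop, hneg, ih c (r + 1) s hc (by omega) hs]
        · by_cases h4 : x = ')'
          · subst h4
            by_cases hr0 : r - 1 < 0
            · simp [checkLoop, balLoop, hneg, hr0,
                checkLoop_neg xs c (r - 1) s (Or.inr (Or.inl hr0))]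
            · simp [checkLoop, balLoop, hneg, hr0, ih c (r - 1) s hc (by omega) hs]
          · by_cases h5 : x = '['
            · subst h5
              simp [checkLoop, balLoop, hneg, ih c r (s + 1) hc hr (by omega)]
            · by_cases h6 : x = ']'
              · subst h6
                by_cases hs0 : s - 1 < 0
                · simp [checkLoop, balLoop, hneg, hs0,
                    checkLoop_neg xs c r (s - 1) (Or.inr (Or.inr hs0))]
                · simp [checkLoop, balLoop, hneg, hs0, ih c r (s - 1) hc hr (by omega)]
              · simp [checkLoop, balLoop, hneg, h1, h2, h3, h4, h5, h6, ih c r s hc hr hs]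

-- ===== VERDICT (by name: the statement is the Claim_ definition above) =====
theorem check_spec : Claim_equal_check := by
  intro string _
  unfold Spec_check check check_alt balanced
  exact checkLoop_eq string.toList 0 0 0 le_rfl le_rfl le_rfl
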